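-- pv_equiv track=rewrite | github.com/CSU-KangHu/NeuralTE | HiTE_util/test.py | split_and_track_kmers
-- ===== SOURCE A (Python) =====
-- def split_and_track_kmers(sequence, p, k):
--     # 将序列补齐，让其变成p的整数倍
--     remainder = len(sequence) % p
--     part_size = len(sequence) // p
--     if remainder != 0:
--         padded_sequence = "N" * ((part_size + 1) * p - len(sequence))
--     else:
--         padded_sequence = ''
--     sequence += padded_sequence
--
--     seq_len = len(sequence)
--     part_size = seq_len // p
--     part_endpoints = [i * part_size for i in range(1, p+1)]
--
--     kmer_records = {}
--     current_part = 0
--     for i in range(0, seq_len - k + 1):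
--         if i >= part_endpoints[-1]:
--             break
--         kmer = sequence[i:i+k]
--         if i >= part_endpoints[current_part]:
--             current_part += 1
--         if not kmer_records.__contains__(kmer):
--             kmer_records[kmer] = []
--         current_parts = kmer_records[kmer]
--         current_parts.append(current_part)
--     return part_endpoints, kmer_records
-- ===== SOURCE B (Python) =====
-- def split_and_track_kmers(sequence, p, k):
--     remainder = len(sequence) % p
--     part_size = len(sequence) // p
--     if remainder != 0:
--         sequence = sequence + "N" * ((part_size + 1) * p - len(sequence))
--     seq_len = len(sequence)
--     part_size = seq_len // p
--     part_endpoints = [i * part_size for i in range(1, p + 1)]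
--     kmer_records = {}
--     limit = seq_len - k + 1
--     for part in range(p):
--         start = part * part_size
--         for i in range(start, min(start + part_size, limit)):
--             kmer = sequence[i:i + k]
--             kmer_records.setdefault(kmer, []).append(part)
--     return part_endpoints, kmer_records
-- ===== Notes on version B (the rewrite author's own statement) =====
-- stated objective: simpler
-- what changed: B replaces A's single pass with a stateful current_part counter and per-iteration endpoint/break checks by a nested loop over part indices, deriving each k-mer's partition from the outer loop variable and bounding the inner start range with min(start+part_size, seq_len-k+1); kmer lists are grouped with dict.setdefault.
import Mathlib
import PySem

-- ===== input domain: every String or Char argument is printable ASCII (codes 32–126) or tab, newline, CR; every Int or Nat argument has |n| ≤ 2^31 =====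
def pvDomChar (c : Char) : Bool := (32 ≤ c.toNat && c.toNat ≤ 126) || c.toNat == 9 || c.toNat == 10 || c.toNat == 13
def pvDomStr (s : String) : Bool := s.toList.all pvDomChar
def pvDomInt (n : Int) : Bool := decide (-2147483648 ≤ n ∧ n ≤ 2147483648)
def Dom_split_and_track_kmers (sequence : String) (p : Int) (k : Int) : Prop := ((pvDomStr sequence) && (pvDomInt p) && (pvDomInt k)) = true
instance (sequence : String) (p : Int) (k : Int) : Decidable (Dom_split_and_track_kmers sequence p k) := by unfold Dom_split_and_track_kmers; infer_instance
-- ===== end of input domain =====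

-- B replaces A's stateful current_part counter and per-iteration break/endpoint checks by a
-- nested loop over part indices (the partition of each k-mer is the outer loop variable); simpler decomposition, same cost.


-- ===== PORT A =====
-- the 'for i in range(0, seq_len - k + 1)' loop of A, with its break and the current_part counter
def pvLoopA (seq : List Char) (k : Int) (endpoints : List Int) (i stop current_part : Int)
    (d : PySem.Dict String (List Int)) : PySem.Dict String (List Int) :=
  if _h : i < stop then   -- 'for i in range(0, seq_len - k + 1)', iterated lazily as Python does
    if PySem.List.pyGetD endpoints (-1) 0 ≤ i then d   -- 'if i >= part_endpoints[-1]: break'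
    else
      let kmer := String.ofList (PySem.List.slice seq (some i) (some (i + k)))
      let current_part' := if PySem.List.pyGetD endpoints current_part 0 ≤ i then current_part + 1 else current_part
      let d1 := if d.contains kmer then d else d.insert kmer ([] : List Int)
      pvLoopA seq k endpoints (i + 1) stop current_part' (d1.modify kmer [] (fun l => l ++ [current_part']))
  else d
termination_by (stop - i).toNat
decreasing_by omega

def split_and_track_kmers (sequence : String) (p : Int) (k : Int) : List Int × (List (String × List Int)) :=
  let L : Int := PySem.Str.len sequence
  let remainder := PySem.Int.mod L p
  let part_size := PySem.Int.floordiv L p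
  -- "N" * n is empty for n ≤ 0, hence .toNat (exact Python semantics)
  let padded : List Char := if remainder ≠ 0 then List.replicate (((part_size + 1) * p - L).toNat) 'N' else []
  let seq : List Char := sequence.toList ++ padded
  let seq_len : Int := (seq.length : Int)
  let part_size2 := PySem.Int.floordiv seq_len p
  let part_endpoints := (PySem.List.pyRange 1 (p + 1) 1).map (fun i => i * part_size2)
  let d := pvLoopA seq k part_endpoints 0 (seq_len - k + 1) 0 ⟨[]⟩
  (part_endpoints, d.items)

-- ===== PORT B =====
def split_and_track_kmers_alt (sequence : String) (p : Int) (k : Int) : List Int × (List (String × List Int)) :=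
  let L : Int := PySem.Str.len sequence
  let remainder := PySem.Int.mod L p
  let part_size := PySem.Int.floordiv L p
  let seq : List Char :=
    if remainder ≠ 0 then sequence.toList ++ List.replicate (((part_size + 1) * p - L).toNat) 'N' else sequence.toList
  let seq_len : Int := (seq.length : Int)
  let part_size2 := PySem.Int.floordiv seq_len p
  let part_endpoints := (PySem.List.pyRange 1 (p + 1) 1).map (fun i => i * part_size2)
  let limit := seq_len - k + 1
  let d := (PySem.List.pyRange 0 p 1).foldl (fun d part =>
      let start := part * part_size2
      (PySem.List.pyRange start (min (start + part_size2) limit) 1).foldl (fun d i =>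
        let kmer := String.ofList (PySem.List.slice seq (some i) (some (i + k)))
        (d.setdefault kmer ([] : List Int)).modify kmer [] (fun l => l ++ [part])) d)
    (⟨[]⟩ : PySem.Dict String (List Int))
  (part_endpoints, d.items)

-- ===== PRECONDITION & SPEC =====
-- Pre_ excludes exactly the inputs on which A raises: p = 0 (ZeroDivisionError in 'len(sequence) % p') and
-- p < 0 with k <= len(sequence) (part_endpoints is empty and 'part_endpoints[-1]' raises IndexError).
def Pre_split_and_track_kmers (sequence : String) (p : Int) (k : Int) : Prop :=
  1 ≤ p ∨ (p ≤ -1 ∧ PySem.Str.len sequence < k)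
instance (sequence : String) (p : Int) (k : Int) : Decidable (Pre_split_and_track_kmers sequence p k) := by
  unfold Pre_split_and_track_kmers; infer_instance

def pvWitness_split_and_track_kmers : String × Int × Int := ("ACGTA", 2, 2)

def Spec_split_and_track_kmers (sequence : String) (p : Int) (k : Int) (out : List Int × (List (String × List Int))) : Prop := out = split_and_track_kmers_alt sequence p k
instance (sequence : String) (p : Int) (k : Int) (out : List Int × (List (String × List Int))) : Decidable (Spec_split_and_track_kmers sequence p k out) := by unfold Spec_split_and_track_kmers; infer_instance

-- ===== CLAIM (what is proved, stated in full; the proofs are below) =====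
def Claim_equal_split_and_track_kmers : Prop := ∀ (sequence : String) (p : Int) (k : Int), Dom_split_and_track_kmers sequence p k → Pre_split_and_track_kmers sequence p k → Spec_split_and_track_kmers sequence p k (split_and_track_kmers sequence p k)

-- ===== LEMMAS AND PROOFS =====

-- the common one-step dict update both loop bodies reduce to
def pvStep (seq : List Char) (k : Int) (d : PySem.Dict String (List Int)) (i part : Int) :
    PySem.Dict String (List Int) :=
  d.modify (String.ofList (PySem.List.slice seq (some i) (some (i + k)))) [] (fun l => l ++ [part])

theorem pv_map_noop {κ ν : Type} [BEq κ] (items : List (κ × ν)) (key : κ) (v : ν)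
    (h : items.any (fun p => p.1 == key) = false) :
    items.map (fun p => if (p.1 == key) = true then (key, v) else p) = items := by
  induction items with
  | nil => rfl
  | cons a t ih =>
    simp only [List.any_cons, Bool.or_eq_false_iff] at h
    simp [h.1, ih h.2]

theorem pv_body_collapse (d : PySem.Dict String (List Int)) (key : String) (f : List Int → List Int) :
    ((if d.contains key then d else d.insert key ([] : List Int)).modify key [] f) = d.modify key [] f := by
  by_cases h : d.contains key
  · simp [h]
  · simp only [Bool.not_eq_true] at h
    simp only [h, Bool.false_eq_true, if_false]
    have hfind : d.items.find? (fun p => p.1 == key) = none := by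
      rw [List.find?_eq_none]
      rw [PySem.Dict.contains, List.any_eq_false] at h
      exact h
    have hins : d.insert key ([] : List Int) = ⟨d.items ++ [(key, [])]⟩ := by
      simp [PySem.Dict.insert, h]
    have hc2 : (⟨d.items ++ [(key, ([] : List Int))]⟩ : PySem.Dict String (List Int)).contains key = true := by
      simp [PySem.Dict.contains]
    rw [hins]
    simp only [PySem.Dict.modify, PySem.Dict.getD, PySem.Dict.get?, PySem.Dict.insert, hc2, h,
      Bool.false_eq_true, if_false, if_true, List.find?_append, hfind, Option.none_or]
    simp only [List.find?_cons, beq_self_eq_true, List.map_append]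
    rw [pv_map_noop _ _ _ (by rw [PySem.Dict.contains] at h; exact h)]
    simp

theorem pv_setdefault_collapse (d : PySem.Dict String (List Int)) (key : String) (f : List Int → List Int) :
    ((d.setdefault key ([] : List Int)).modify key [] f) = d.modify key [] f := by
  have h : d.setdefault key ([] : List Int) = if d.contains key then d else d.insert key ([] : List Int) := by
    by_cases hc : d.contains key <;> simp [PySem.Dict.setdefault, PySem.Dict.insert, hc]
  rw [h, pv_body_collapse]

theorem pv_fdiv_step (s a cp : Int) (hs : 0 < s) (ha : 0 ≤ a)
    (hcp : cp = max 0 (PySem.Int.floordiv (a - 1) s)) :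
    (if (cp + 1) * s ≤ a then cp + 1 else cp) = PySem.Int.floordiv a s := by
  have hq1 : (PySem.Int.floordiv a s) * s ≤ a := (PySem.Int.le_floordiv_iff_mul_le hs).mp le_rfl
  have hq2 : a < (PySem.Int.floordiv a s + 1) * s := (PySem.Int.floordiv_lt_iff_lt_mul hs).mp (by omega)
  have hr1 : (PySem.Int.floordiv (a - 1) s) * s ≤ a - 1 := (PySem.Int.le_floordiv_iff_mul_le hs).mp le_rfl
  have hr2 : a - 1 < (PySem.Int.floordiv (a - 1) s + 1) * s := (PySem.Int.floordiv_lt_iff_lt_mul hs).mp (by omega)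
  by_cases h0 : a = 0
  · subst h0
    have hcp0 : cp = 0 := by
      have : PySem.Int.floordiv (0 - 1) s < 0 := (PySem.Int.floordiv_lt_iff_lt_mul hs).mpr (by omega)
      omega
    have hqz : PySem.Int.floordiv 0 s = 0 := by
      have h1 : 0 ≤ PySem.Int.floordiv 0 s := (PySem.Int.le_floordiv_iff_mul_le hs).mpr (by omega)
      have h2 : PySem.Int.floordiv 0 s < 1 := (PySem.Int.floordiv_lt_iff_lt_mul hs).mpr (by omega)
      omega
    rw [hcp0, hqz, if_neg (by omega : ¬ ((0 + 1) * s ≤ (0 : Int)))]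
  · have ha1 : 1 ≤ a := by omega
    have hrnn : 0 ≤ PySem.Int.floordiv (a - 1) s := (PySem.Int.le_floordiv_iff_mul_le hs).mpr (by omega)
    have hcpr : cp = PySem.Int.floordiv (a - 1) s := by omega
    subst hcpr
    split_ifs with h
    · -- a = (cp+1)*s exactly; floordiv a s = cp + 1
      have heq : a = (PySem.Int.floordiv (a - 1) s + 1) * s := le_antisymm (by omega) h
      have h1 : PySem.Int.floordiv a s ≤ PySem.Int.floordiv (a - 1) s + 1 :=
        le_of_mul_le_mul_right (heq ▸ hq1) hs
      have h2 : PySem.Int.floordiv (a - 1) s + 1 < PySem.Int.floordiv a s + 1 :=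
        lt_of_mul_lt_mul_right (heq ▸ hq2) (le_of_lt hs)
      omega
    · have hlt : a < (PySem.Int.floordiv (a - 1) s + 1) * s := by omega
      have h1 : PySem.Int.floordiv a s < PySem.Int.floordiv (a - 1) s + 1 :=
        lt_of_mul_lt_mul_right (lt_of_le_of_lt hq1 hlt) (le_of_lt hs)
      have h2 : PySem.Int.floordiv (a - 1) s < PySem.Int.floordiv a s + 1 :=
        lt_of_mul_lt_mul_right (lt_of_le_of_lt (by omega : PySem.Int.floordiv (a-1) s * s ≤ a) hq2) (le_of_lt hs)
      omega

-- part_endpoints[-1] = p * s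
theorem pv_endpoints_last (p s : Int) (hp : 1 ≤ p) :
    PySem.List.pyGetD ((PySem.List.pyRange 1 (p + 1) 1).map (fun i => i * s)) (-1) 0 = p * s := by
  rw [PySem.List.pyRange_one_succ_right hp, List.map_append]
  exact PySem.List.pyGetD_neg_one_append_singleton _ _ _

-- part_endpoints[cp] = (cp + 1) * s for 0 ≤ cp < p
theorem pv_endpoints_get (p s cp : Int) (h0 : 0 ≤ cp) (hlt : cp < p) :
    PySem.List.pyGetD ((PySem.List.pyRange 1 (p + 1) 1).map (fun i => i * s)) cp 0 = (cp + 1) * s := by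
  have hc : cp = (cp.toNat : Int) := (Int.toNat_of_nonneg h0).symm
  rw [hc]
  rw [PySem.List.pyGetD_map_pyRange_one (fun i => i * s) 1 (p + 1) cp.toNat 0 (by omega)]
  push_cast [Int.toNat_of_nonneg h0]
  ring

-- characterisation of A's loop as a plain fold with part = i // s
theorem pv_loopA_eq (seq : List Char) (k p s : Int) (hp : 1 ≤ p) (hs : 0 < s) :
    ∀ (cnt : Nat) (a b cp : Int) (d : PySem.Dict String (List Int)),
    0 ≤ a → cnt = (b - a).toNat → cp = max 0 (PySem.Int.floordiv (a - 1) s) →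
    pvLoopA seq k ((PySem.List.pyRange 1 (p + 1) 1).map (fun i => i * s)) a b cp d
      = (PySem.List.pyRange a (min b (p * s)) 1).foldl
          (fun d i => pvStep seq k d i (PySem.Int.floordiv i s)) d := by
  intro cnt
  induction cnt with
  | zero =>
    intro a b cp d ha hcnt _
    have hba : b ≤ a := by omega
    rw [pvLoopA, dif_neg (by omega : ¬ a < b),
      PySem.List.pyRange_one_eq_nil (by omega : min b (p * s) ≤ a)]
    rfl
  | succ n ih =>
    intro a b cp d ha hcnt hcp
    have hab : a < b := by omega
    rw [pvLoopA, dif_pos hab]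
    rw [pv_endpoints_last p s hp]
    by_cases hbrk : p * s ≤ a
    · rw [if_pos hbrk, PySem.List.pyRange_one_eq_nil (by omega : min b (p * s) ≤ a)]
      rfl
    · rw [if_neg hbrk]
      have haps : a < p * s := by omega
      have hcpn : 0 ≤ cp := by omega
      have hcplt : cp < p := by
        have : PySem.Int.floordiv (a - 1) s < p := (PySem.Int.floordiv_lt_iff_lt_mul hs).mpr (by omega)
        omega
      rw [pv_endpoints_get p s cp hcpn hcplt]
      have hstep := pv_fdiv_step s a cp hs ha hcp
      have hnn : 0 ≤ PySem.Int.floordiv a s := (PySem.Int.le_floordiv_iff_mul_le hs).mpr (by omega)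
      rw [PySem.List.pyRange_one_cons (by omega : a < min b (p * s)), List.foldl_cons]
      show pvLoopA seq k _ _ _ _ _ = _
      rw [hstep, pv_body_collapse]
      exact ih (a + 1) b (PySem.Int.floordiv a s) _ (by omega) (by omega)
        (by rw [show a + 1 - 1 = a from by ring]; omega)

-- characterisation of B's nested loop as the same fold
theorem pv_loopB_eq (seq : List Char) (k s limit : Int) (hs : 0 < s) :
    ∀ (j : Nat) (D : PySem.Dict String (List Int)),
    (PySem.List.pyRange 0 (j : Int) 1).foldl (fun d part =>
        (PySem.List.pyRange (part * s) (min (part * s + s) limit) 1).foldl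
          (fun d i => pvStep seq k d i part) d) D
      = (PySem.List.pyRange 0 (min limit ((j : Int) * s)) 1).foldl
          (fun d i => pvStep seq k d i (PySem.Int.floordiv i s)) D := by
  intro j
  induction j with
  | zero =>
    intro D
    simp only [Nat.cast_zero]
    rw [PySem.List.pyRange_one_eq_nil (by omega : (0:Int) ≤ 0),
      PySem.List.pyRange_one_eq_nil (by omega : min limit ((0:Int) * s) ≤ 0)]
    rfl
  | succ j ih =>
    intro D
    have hj : ((j + 1 : Nat) : Int) = (j : Int) + 1 := by push_cast; ring
    rw [hj, PySem.List.pyRange_one_succ_right (by positivity : (0:Int) ≤ (j : Int)), List.foldl_append,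
      ih D, List.foldl_cons, List.foldl_nil]
    have hexp : ((j : Int) + 1) * s = (j : Int) * s + s := by ring
    have hinner : ∀ (d0 : PySem.Dict String (List Int)),
        (PySem.List.pyRange ((j : Int) * s) (min ((j : Int) * s + s) limit) 1).foldl
          (fun d i => pvStep seq k d i (j : Int)) d0
        = (PySem.List.pyRange ((j : Int) * s) (min ((j : Int) * s + s) limit) 1).foldl
          (fun d i => pvStep seq k d i (PySem.Int.floordiv i s)) d0 := by
      intro d0
      apply PySem.List.foldl_congr_mem
      intro acc x hx
      rw [PySem.List.mem_pyRange_one] at hx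
      have h1 : (j : Int) ≤ PySem.Int.floordiv x s := (PySem.Int.le_floordiv_iff_mul_le hs).mpr (by omega)
      have h2 : PySem.Int.floordiv x s < (j : Int) + 1 := (PySem.Int.floordiv_lt_iff_lt_mul hs).mpr (by omega)
      have hxj : PySem.Int.floordiv x s = (j : Int) := by omega
      rw [hxj]
    rw [hinner]
    by_cases hl : limit ≤ (j : Int) * s
    · have h1 : min limit ((j : Int) * s) = limit := by omega
      have h2 : min ((j : Int) * s + s) limit = limit := by omega
      have h3 : min limit (((j : Int) + 1) * s) = limit := by omega
      rw [h1, h2, h3, PySem.List.pyRange_one_eq_nil (by omega : limit ≤ (j : Int) * s)]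
      rfl
    · have h1 : min limit ((j : Int) * s) = (j : Int) * s := by omega
      have h2 : min limit (((j : Int) + 1) * s) = min ((j : Int) * s + s) limit := by
        have : ((j : Int) + 1) * s = (j : Int) * s + s := by ring
        omega
      rw [h1, h2]
      rw [PySem.List.pyRange_one_append 0 ((j : Int) * s) (min ((j : Int) * s + s) limit)
        (by positivity) (by omega), List.foldl_append]
  
theorem pv_fdiv_mul_self (q p : Int) (hp : 0 < p) : PySem.Int.floordiv (q * p) p = q := by
  have h1 : q ≤ PySem.Int.floordiv (q * p) p := (PySem.Int.le_floordiv_iff_mul_le hp).mpr le_rfl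
  have hexp : (q + 1) * p = q * p + p := by ring
  have h2 : PySem.Int.floordiv (q * p) p < q + 1 := (PySem.Int.floordiv_lt_iff_lt_mul hp).mpr (by omega)
  omega

-- length of the padded sequence is divisible by p, quotient = recomputed part_size
theorem pv_seqlen_eq (L p : Int) (hp : 0 < p) :
    (if PySem.Int.mod L p ≠ 0 then (((PySem.Int.floordiv L p + 1) * p - L).toNat : Int) else 0) + L
      = PySem.Int.floordiv
          ((if PySem.Int.mod L p ≠ 0 then (((PySem.Int.floordiv L p + 1) * p - L).toNat : Int) else 0) + L) p * p := by
  have h1 := PySem.Int.floordiv_mul_add_mod L p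
  have h2 := PySem.Int.mod_nonneg L hp
  have h3 := PySem.Int.mod_lt L hp
  have hexp : (PySem.Int.floordiv L p + 1) * p = PySem.Int.floordiv L p * p + p := by ring
  by_cases hm : PySem.Int.mod L p = 0
  · simp only [hm, ne_eq, not_true_eq_false, if_false]
    have hL' : L = PySem.Int.floordiv L p * p := by omega
    rw [zero_add, hL', pv_fdiv_mul_self _ _ hp]
  · simp only [hm, ne_eq, not_false_eq_true, if_true]
    have hc : (((PySem.Int.floordiv L p + 1) * p - L).toNat : Int) = (PySem.Int.floordiv L p + 1) * p - L := by
      rw [Int.toNat_of_nonneg (by omega)]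
    rw [hc]
    have hsum : (PySem.Int.floordiv L p + 1) * p - L + L = (PySem.Int.floordiv L p + 1) * p := by ring
    rw [hsum, pv_fdiv_mul_self _ _ hp]

-- ===== VERDICT (by name: the statement is the Claim_ definition above) =====
theorem split_and_track_kmers_spec : Claim_equal_split_and_track_kmers := by
  intro sequence p k _ hpre
  unfold Spec_split_and_track_kmers
  simp only [split_and_track_kmers, split_and_track_kmers_alt, PySem.Str.len_eq]
  set T := sequence.toList with hT
  set L : Int := (T.length : Int) with hL
  set padded : List Char := if PySem.Int.mod L p ≠ 0 then
      List.replicate (((PySem.Int.floordiv L p + 1) * p - L).toNat) 'N' else [] with hpadded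
  have hseqB : (if PySem.Int.mod L p ≠ 0 then
      T ++ List.replicate (((PySem.Int.floordiv L p + 1) * p - L).toNat) 'N' else T) = T ++ padded := by
    by_cases h : PySem.Int.mod L p = 0 <;> simp [hpadded, h]
  rw [hseqB]
  set seq : List Char := T ++ padded with hseq
  set n : Int := ((seq.length : Nat) : Int) with hn
  set s : Int := PySem.Int.floordiv n p with hs
  refine Prod.ext_iff.mpr ⟨rfl, ?_⟩
  simp only [pv_setdefault_collapse]
  have hL0 : 0 ≤ L := by positivity
  have hn0 : 0 ≤ n := by positivity
  by_cases hp1 : 1 ≤ p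
  · -- normal case p >= 1
    have hlen : n = (if PySem.Int.mod L p ≠ 0 then
        (((PySem.Int.floordiv L p + 1) * p - L).toNat : Int) else 0) + L := by
      rw [hn, hseq, List.length_append]
      by_cases h : PySem.Int.mod L p = 0 <;>
        simp [hpadded, h, List.length_replicate] <;> omega
    have hnsp : n = s * p := by
      rw [hs]
      conv_lhs => rw [hlen]
      conv_rhs => rw [hlen]
      exact pv_seqlen_eq L p (by omega)
    have hs0 : 0 ≤ s := (PySem.Int.le_floordiv_iff_mul_le (by omega : (0:Int) < p)).mpr (by omega)
    rcases lt_or_eq_of_le hs0 with hspos | hszero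
    · -- s > 0 : both loops are the canonical fold
      have hA := pv_loopA_eq seq k p s hp1 hspos (n - k + 1 - 0).toNat 0 (n - k + 1) 0 ⟨[]⟩
        le_rfl rfl (by
          have : PySem.Int.floordiv (0 - 1) s < 0 :=
            (PySem.Int.floordiv_lt_iff_lt_mul hspos).mpr (by omega)
          omega)
      have hB := pv_loopB_eq seq k s (n - k + 1) hspos p.toNat ⟨[]⟩
      rw [Int.toNat_of_nonneg (by omega : (0:Int) ≤ p)] at hB
      simp only [pvStep] at hA hB
      rw [hA, hB]
    · -- s = 0 : the sequence is empty and both loops do nothing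
      rw [← hszero]
      have hAside : pvLoopA seq k (List.map (fun i => i * 0) (PySem.List.pyRange 1 (p + 1)))
          0 (n - k + 1) 0 ⟨[]⟩ = (⟨[]⟩ : PySem.Dict String (List Int)) := by
        rw [pvLoopA]
        by_cases hlt : (0 : Int) < n - k + 1
        · rw [dif_pos hlt, pv_endpoints_last p 0 hp1, if_pos (by omega : p * 0 ≤ 0)]
        · rw [dif_neg hlt]
      rw [hAside]
      have hBside : ∀ (D : PySem.Dict String (List Int)),
          (PySem.List.pyRange 0 p 1).foldl (fun d part =>
            (PySem.List.pyRange (part * 0) (min (part * 0 + 0) (n - k + 1)) 1).foldl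
              (fun d i => d.modify (String.ofList (PySem.List.slice seq (some i) (some (i + k)))) []
                (fun l => l ++ [part])) d) D = D := by
        intro D
        rw [PySem.List.foldl_congr_mem _ _ (fun d _ => d) D ?_]
        · exact PySem.List.foldl_ignore _ _
        · intro acc x _
          rw [PySem.List.pyRange_one_eq_nil (by omega : min (x * 0 + 0) (n - k + 1) ≤ x * 0)]
          rfl
      rw [hBside]
  · -- p <= -1 and len(sequence) < k : both loops are empty
    rcases hpre with h | h
    · omega
    rw [PySem.Str.len_eq, ← hT, ← hL] at h
    have hpneg : 0 < -p := by omega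
    have hmodf := PySem.Int.floordiv_mul_add_mod L p
    have hmm : PySem.Int.mod L p = - PySem.Int.mod (-L) (-p) := by
      have := PySem.Int.mod_neg_neg (-L) (-p)
      simp only [neg_neg] at this
      omega
    have hub := PySem.Int.mod_lt (-L) hpneg
    have hlb := PySem.Int.mod_nonneg (-L) hpneg
    have hexp : (PySem.Int.floordiv L p + 1) * p = PySem.Int.floordiv L p * p + p := by ring
    have hpad0 : padded = [] := by
      rw [hpadded]
      by_cases hm : PySem.Int.mod L p = 0 <;>
        simp [hm, Int.toNat_of_nonpos (by omega : (PySem.Int.floordiv L p + 1) * p - L ≤ 0)]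
    have hnL : n = L := by rw [hn, hseq, hpad0, List.append_nil, hL]
    rw [pvLoopA, dif_neg (by omega : ¬ (0:Int) < n - k + 1),
      PySem.List.pyRange_one_eq_nil (by omega : p ≤ 0)]
    rfl
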